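-- pv_equiv track=rewrite | github.com/bunny1911/EasyCheck | app/funcs/receipt/funcs.py | format_center_lines
-- ===== SOURCE A (Python) =====
-- def split_words(words: list[str], max_width: int, hyphen: bool = True) -> list[str]:
--     """
--     For each word, split it into parts with maximum width.
--     If word is shorter than max_width, return it as is.
--     """
--
--     new_words: list[str] = []
--
--     for word in words:
--         if len(word) <= max_width:
--             # Word is short enough
--             new_words.append(word)
--
--         else:
--             # Need to break it
--             while len(word) > max_width:
--                 if hyphen:
--                     # Break word into parts with hyphen
--                     new_words.append(word[:max_width - 1] + "-")  # -1 for hyphen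
--                     word = word[max_width - 1:]
--
--                 else:
--                     # Break word into parts without hyphen
--                     new_words.append(word[:max_width])
--                     word = word[max_width:]
--
--             # Add remaining part
--             new_words.append(word)
--
--         if max_width == 1:
--             # Add empty string to separate words
--             new_words.append("")
--
--     return new_words
--
-- def format_center_lines(
--         width: int,
--         min_spaces: int,
--         text: str | None = None,
--         hyphen: bool = True,
-- ) -> str:
--     """
--     Format center lines
--     """
--
--     # Validate
--     assert width >= 1, "Width must be greater or equal to 1"
--     assert min_spaces >= 0, "Minimum spaces must be greater than or equal to 0"
--     assert width - min_spaces * 2 > 0, "Width must be greater than twice minimum spaces"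
--
--     # Split text into words
--     words = text.split()
--
--     # Break words if they are too long
--     words = split_words(words, width - min_spaces * 2, hyphen=hyphen)
--
--     # Form lines
--     lines = []
--     line = words.pop(0)
--
--     for word in words:
--         if len(line) + len(word) + min_spaces * 2 + 1 > width:  # +1 for space
--             # Too long => fill with spaces & break
--             lines.append(f"{line: ^{width}}")
--             line = word
--
--         else:
--             line += " " + word
--
--     # Add last line
--     lines.append(f"{line: ^{width}}")
--
--     return "\n".join(lines)
-- ===== SOURCE B (Python) =====
-- def format_center_lines(
--         width: int,
--         min_spaces: int,
--         text: str | None = None,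
--         hyphen: bool = True,
-- ) -> str:
--     """Format center lines — single streaming pass (no intermediate word list)."""
--
--     assert width >= 1, "Width must be greater or equal to 1"
--     assert min_spaces >= 0, "Minimum spaces must be greater than or equal to 0"
--     assert width - min_spaces * 2 > 0, "Width must be greater than twice minimum spaces"
--
--     w = width - min_spaces * 2
--     step = (w - 1) if hyphen else w
--
--     def chunks():
--         # yield each word's pieces one at a time, slicing by a moving index
--         for word in text.split():
--             i, n = 0, len(word)
--             while n - i > w:
--                 yield (word[i:i + step] + "-") if hyphen else word[i:i + step]
--                 i += step
--             yield word[i:]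
--             if w == 1:
--                 yield ""  # separator token after each word when pieces are single chars
--
--     it = chunks()
--     line = next(it)
--     out = []
--     for chunk in it:
--         if len(line) + len(chunk) + min_spaces * 2 + 1 > width:
--             out.append(f"{line: ^{width}}")
--             line = chunk
--         else:
--             line += " " + chunk
--     out.append(f"{line: ^{width}}")
--     return "\n".join(out)
-- ===== Notes on version B (the rewrite author's own statement) =====
-- stated objective: alternative
-- what changed: B replaces A's two-phase design (materialize the full broken-word list via split_words, then pop/iterate to pack lines) with a single streaming pass: a generator slices each word by a moving index (instead of repeatedly re-slicing the shrinking remainder) and feeds chunks one at a time into the packer, so no intermediate word list is ever built.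
import Mathlib
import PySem

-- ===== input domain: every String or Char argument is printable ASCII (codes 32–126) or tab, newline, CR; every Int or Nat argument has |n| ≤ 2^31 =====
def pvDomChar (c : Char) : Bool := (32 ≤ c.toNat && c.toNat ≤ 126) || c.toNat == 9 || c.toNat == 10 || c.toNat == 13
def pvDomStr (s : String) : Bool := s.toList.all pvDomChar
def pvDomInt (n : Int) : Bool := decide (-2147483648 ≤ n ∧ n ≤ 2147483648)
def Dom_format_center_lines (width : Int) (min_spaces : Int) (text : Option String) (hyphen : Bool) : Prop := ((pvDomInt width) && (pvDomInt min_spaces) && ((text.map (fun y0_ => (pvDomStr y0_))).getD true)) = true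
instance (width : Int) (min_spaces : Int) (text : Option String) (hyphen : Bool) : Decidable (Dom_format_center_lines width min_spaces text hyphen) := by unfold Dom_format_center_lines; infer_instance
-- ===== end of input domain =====

-- B replaces A's two-phase "build the full broken-word list, then pack" with a single streaming
-- pass that slices each word by a moving index and feeds chunks straight into the packer
-- (objective: alternative decomposition; same return value on all of Pre_).

-- f"{s: ^{width}}": center with spaces, extra space on the right, no truncation.
-- Shared by both ports: both Pythons contain the identical f-string.
def pvCenter (width : Int) (s : List Char) : List Char :=
  if (s.length : Int) ≥ width then s
  else
    let pad := (width - s.length).toNat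
    List.replicate (pad / 2) ' ' ++ s ++ List.replicate (pad - pad / 2) ' '

-- ===== PORT A =====
-- A's inner `while len(word) > max_width` re-slices the remainder; fuel = the word's length
-- (on the inputs where the Python loop diverges — excluded by Pre_ — the fuel just runs out).
def pvBreakA (hyphen : Bool) (maxW : Int) (word : List Char) (fuel : Nat) : List (List Char) :=
  match fuel with
  | 0 => [word]
  | f + 1 =>
    if (word.length : Int) > maxW then
      if hyphen then
        (PySem.List.slice word none (some (maxW - 1)) ++ ['-']) ::
          pvBreakA hyphen maxW (PySem.List.slice word (some (maxW - 1)) none) f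
      else
        PySem.List.slice word none (some maxW) ::
          pvBreakA hyphen maxW (PySem.List.slice word (some maxW) none) f
    else [word]

-- split_words: outer for-loop appending each word's pieces (plus the "" token when max_width == 1)
def pvSplitWordsA (words : List (List Char)) (maxW : Int) (hyphen : Bool) : List (List Char) :=
  words.foldl
    (fun acc word =>
      (acc ++ pvBreakA hyphen maxW word word.length) ++ (if maxW = 1 then [[]] else [])) []

def format_center_lines (width : Int) (min_spaces : Int) (text : Option String) (hyphen : Bool) : String :=
  -- the three asserts (AssertionError → outside Pre_)
  if width < 1 ∨ min_spaces < 0 ∨ width - min_spaces * 2 ≤ 0 then ""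
  else
    match text with
    | none => ""   -- text.split() on None: AttributeError → outside Pre_
    | some t =>
      let words := pvSplitWordsA (PySem.Chars.split₀ t.toList) (width - min_spaces * 2) hyphen
      match words with
      | [] => ""   -- words.pop(0) on []: IndexError → outside Pre_
      | line0 :: rest =>
        let st := rest.foldl
          (fun st word =>
            if (st.1.length : Int) + word.length + min_spaces * 2 + 1 > width then
              (word, st.2 ++ [pvCenter width st.1])
            else (st.1 ++ ' ' :: word, st.2))
          (line0, ([] : List (List Char)))
        String.ofList (PySem.Chars.join ['\n'] (st.2 ++ [pvCenter width st.1]))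

-- ===== PORT B =====
-- B's generator: slice word by a moving index i, step characters at a time; fuel = word length.
def pvChunkB (hyphen : Bool) (w step : Int) (word : List Char) (i : Int) (fuel : Nat) : List (List Char) :=
  match fuel with
  | 0 => [PySem.List.slice word (some i) none]
  | f + 1 =>
    if (word.length : Int) - i > w then
      (if hyphen then PySem.List.slice word (some i) (some (i + step)) ++ ['-']
       else PySem.List.slice word (some i) (some (i + step))) ::
        pvChunkB hyphen w step word (i + step) f
    else [PySem.List.slice word (some i) none]

-- one step of B's packer loop; `none` = before `line = next(it)` has happened
def pvFeed (width min_spaces : Int) (st : Option (List Char) × List (List Char)) (chunk : List Char) :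
    Option (List Char) × List (List Char) :=
  match st.1 with
  | none => (some chunk, st.2)
  | some line =>
    if (line.length : Int) + chunk.length + min_spaces * 2 + 1 > width then
      (some chunk, st.2 ++ [pvCenter width line])
    else (some (line ++ ' ' :: chunk), st.2)

def format_center_lines_alt (width : Int) (min_spaces : Int) (text : Option String) (hyphen : Bool) : String :=
  if width < 1 ∨ min_spaces < 0 ∨ width - min_spaces * 2 ≤ 0 then ""
  else
    match text with
    | none => ""
    | some t =>
      let w := width - min_spaces * 2
      let step := if hyphen then w - 1 else w
      let st := (PySem.Chars.split₀ t.toList).foldl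
        (fun st word =>
          (pvChunkB hyphen w step word 0 word.length ++ (if w = 1 then [[]] else [])).foldl
            (pvFeed width min_spaces) st)
        ((none : Option (List Char)), ([] : List (List Char)))
      match st.1 with
      | none => ""   -- no chunk ever arrived (empty word list): next(it) raises → outside Pre_
      | some line => String.ofList (PySem.Chars.join ['\n'] (st.2 ++ [pvCenter width line]))

-- ===== PRECONDITION & SPEC =====
-- Pre_ excludes exactly where Python A does not return: failed asserts (AssertionError),
-- text=None (AttributeError), whitespace-only/empty text (IndexError on pop(0)), and the
-- divergence of split_words when hyphen=True, width-2*min_spaces=1 and some word is longer than 1.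
def Pre_format_center_lines (width : Int) (min_spaces : Int) (text : Option String) (hyphen : Bool) : Prop :=
  1 ≤ width ∧ 0 ≤ min_spaces ∧ 0 < width - min_spaces * 2 ∧ text ≠ none ∧
  PySem.Chars.split₀ (text.getD "").toList ≠ [] ∧
  (hyphen = true → width - min_spaces * 2 = 1 →
    ∀ word ∈ PySem.Chars.split₀ (text.getD "").toList, word.length ≤ 1)
instance (width : Int) (min_spaces : Int) (text : Option String) (hyphen : Bool) : Decidable (Pre_format_center_lines width min_spaces text hyphen) := by unfold Pre_format_center_lines; infer_instance

def pvWitness_format_center_lines : Int × Int × Option String × Bool := (7, 1, some "hello wide world", true)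

def Spec_format_center_lines (width : Int) (min_spaces : Int) (text : Option String) (hyphen : Bool) (out : String) : Prop := out = format_center_lines_alt width min_spaces text hyphen
instance (width : Int) (min_spaces : Int) (text : Option String) (hyphen : Bool) (out : String) : Decidable (Spec_format_center_lines width min_spaces text hyphen out) := by unfold Spec_format_center_lines; infer_instance

-- ===== CLAIM (what is proved, stated in full; the proofs are below) =====
def Claim_equal_format_center_lines : Prop := ∀ (width : Int) (min_spaces : Int) (text : Option String) (hyphen : Bool), Dom_format_center_lines width min_spaces text hyphen → Pre_format_center_lines width min_spaces text hyphen → Spec_format_center_lines width min_spaces text hyphen (format_center_lines width min_spaces text hyphen)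

-- ===== LEMMAS AND PROOFS =====

-- slicing the dropped remainder = slicing the original word at a moving index
theorem pvSliceHead (word : List Char) (i : Nat) (m : Int) (hm : 0 ≤ m) :
    PySem.List.slice (word.drop i) none (some m) =
      PySem.List.slice word (some (i : Int)) (some ((i : Int) + m)) := by
  rw [PySem.List.slice_to (word.drop i) hm, PySem.List.slice_toNat word (by omega) (by omega)]
  simp only [Int.toNat_natCast]
  congr 1
  omega

theorem pvSliceTail (word : List Char) (i : Nat) (m : Int) (hm : 0 ≤ m) :
    PySem.List.slice (word.drop i) (some m) none = word.drop (i + m.toNat) := by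
  rw [PySem.List.slice_from (word.drop i) hm, List.drop_drop]

-- A's remainder-re-slicing break loop produces the same chunks as B's moving-index loop.
theorem pvBreakA_eq_chunkB (hyphen : Bool) (maxW : Int) (h1 : 1 ≤ maxW) (word : List Char) :
    ∀ (fuel : Nat) (i : Nat),
      pvBreakA hyphen maxW (word.drop i) fuel =
        pvChunkB hyphen maxW (if hyphen then maxW - 1 else maxW) word (i : Int) fuel := by
  intro fuel
  induction fuel with
  | zero =>
    intro i
    simp [pvBreakA, pvChunkB, PySem.List.slice_from_natCast]
  | succ f ih =>
    intro i
    have hcond : (((word.drop i).length : Int) > maxW) ↔ ((word.length : Int) - (i : Int) > maxW) := by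
      simp only [List.length_drop]
      omega
    cases hyphen with
    | false =>
      simp only [pvBreakA, pvChunkB, hcond, Bool.false_eq_true, if_false]
      by_cases hlen : ((word.length : Int) - (i : Int) > maxW)
      · simp only [if_pos hlen]
        refine List.cons_eq_cons.mpr ⟨pvSliceHead word i maxW (by omega), ?_⟩
        have hi : (i : Int) + maxW = ((i + maxW.toNat : Nat) : Int) := by omega
        rw [pvSliceTail word i maxW (by omega), hi]
        exact ih (i + maxW.toNat)
      · simp [if_neg hlen, PySem.List.slice_from_natCast]
    | true =>
      simp only [pvBreakA, pvChunkB, hcond, if_true]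
      by_cases hlen : ((word.length : Int) - (i : Int) > maxW)
      · simp only [if_pos hlen]
        refine List.cons_eq_cons.mpr
          ⟨congrArg (· ++ ['-']) (pvSliceHead word i (maxW - 1) (by omega)), ?_⟩
        have hi : (i : Int) + (maxW - 1) = ((i + (maxW - 1).toNat : Nat) : Int) := by omega
        rw [pvSliceTail word i (maxW - 1) (by omega), hi]
        exact ih (i + (maxW - 1).toNat)
      · simp [if_neg hlen, PySem.List.slice_from_natCast]

theorem pvBreakA_ne_nil (hyphen : Bool) (maxW : Int) (word : List Char) (fuel : Nat) :
    pvBreakA hyphen maxW word fuel ≠ [] := by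
  cases fuel with
  | zero => simp [pvBreakA]
  | succ f =>
    simp only [pvBreakA]
    split_ifs <;> simp

-- A's split_words is the concatenation of the per-word chunk-plus-separator lists.
theorem pvSplitWordsA_eq_flatMap (words : List (List Char)) (maxW : Int) (hyphen : Bool) :
    pvSplitWordsA words maxW hyphen =
      words.flatMap (fun word =>
        pvBreakA hyphen maxW word word.length ++ (if maxW = 1 then [[]] else [])) := by
  unfold pvSplitWordsA
  have h : ∀ (acc : List (List Char)) (word : List Char),
      (acc ++ pvBreakA hyphen maxW word word.length) ++ (if maxW = 1 then [[]] else []) =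
        acc ++ (pvBreakA hyphen maxW word word.length ++ (if maxW = 1 then [[]] else [])) := by
    intro acc word; simp
  rw [List.foldl_ext _ _ [] (fun acc word _ => h acc word)]
  simpa using PySem.List.foldl_append_eq_flatMap
    (fun word => pvBreakA hyphen maxW word word.length ++ (if maxW = 1 then [[]] else [])) words ([] : List (List Char))

-- once B's packer has its first line, it runs exactly A's packer step
theorem foldl_feed_some (width min_spaces : Int) :
    ∀ (L : List (List Char)) (line : List Char) (acc : List (List Char)),
      L.foldl (pvFeed width min_spaces) (some line, acc) =
        (fun p => ((some p.1 : Option (List Char)), p.2))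
          (L.foldl
            (fun st word =>
              if (st.1.length : Int) + word.length + min_spaces * 2 + 1 > width then
                (word, st.2 ++ [pvCenter width st.1])
              else (st.1 ++ ' ' :: word, st.2))
            (line, acc)) := by
  intro L
  induction L with
  | nil => intro line acc; rfl
  | cons c cs ih =>
    intro line acc
    simp only [List.foldl_cons, pvFeed]
    by_cases h : (line.length : Int) + c.length + min_spaces * 2 + 1 > width
    · simp only [if_pos h]; exact ih c (acc ++ [pvCenter width line])
    · simp only [if_neg h]; exact ih (line ++ ' ' :: c) acc

-- ===== VERDICT (by name: the statement is the Claim_ definition above) =====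
theorem format_center_lines_spec : Claim_equal_format_center_lines := by
  intro width min_spaces text hyphen _ hpre
  obtain ⟨hw, hms, hwin, htext, hsplit, _⟩ := hpre
  cases text with
  | none => exact absurd rfl htext
  | some t =>
    simp only [Option.getD_some] at hsplit
    unfold Spec_format_center_lines format_center_lines format_center_lines_alt
    rw [if_neg (by omega), if_neg (by omega)]
    dsimp only
    -- the chunk streams agree word by word
    have hchunks : ∀ word : List Char,
        pvBreakA hyphen (width - min_spaces * 2) word word.length ++
            (if width - min_spaces * 2 = 1 then [[]] else []) =
          pvChunkB hyphen (width - min_spaces * 2)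
              (if hyphen then width - min_spaces * 2 - 1 else width - min_spaces * 2)
              word 0 word.length ++ (if width - min_spaces * 2 = 1 then [[]] else []) := by
      intro word
      have := pvBreakA_eq_chunkB hyphen (width - min_spaces * 2) (by omega) word word.length 0
      simpa using congrArg (· ++ (if width - min_spaces * 2 = 1 then [[]] else [])) this
    -- B's nested fold = one fold over the flattened chunk list = fold over A's split_words result
    have hB : (PySem.Chars.split₀ t.toList).foldl
        (fun st word =>
          (pvChunkB hyphen (width - min_spaces * 2)
              (if hyphen then width - min_spaces * 2 - 1 else width - min_spaces * 2)
              word 0 word.length ++ (if width - min_spaces * 2 = 1 then [[]] else [])).foldl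
            (pvFeed width min_spaces) st)
        ((none : Option (List Char)), ([] : List (List Char))) =
        (pvSplitWordsA (PySem.Chars.split₀ t.toList) (width - min_spaces * 2) hyphen).foldl
          (pvFeed width min_spaces) ((none : Option (List Char)), ([] : List (List Char))) := by
      rw [pvSplitWordsA_eq_flatMap, List.foldl_flatMap]
      exact List.foldl_ext _ _ _ (fun st word _ => by rw [hchunks word])
    rw [hB]
    -- A's word list is nonempty
    have hne : pvSplitWordsA (PySem.Chars.split₀ t.toList) (width - min_spaces * 2) hyphen ≠ [] := by
      rw [pvSplitWordsA_eq_flatMap]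
      cases hw0 : PySem.Chars.split₀ t.toList with
      | nil => exact absurd hw0 hsplit
      | cons w0 ws =>
        simp only [List.flatMap_cons, ne_eq, List.append_eq_nil_iff, not_and_or]
        left
        simp [pvBreakA_ne_nil]
    cases hlist : pvSplitWordsA (PySem.Chars.split₀ t.toList) (width - min_spaces * 2) hyphen with
    | nil => exact absurd hlist hne
    | cons c0 rest =>
      simp only [List.foldl_cons]
      show String.ofList _ = _
      rw [show pvFeed width min_spaces ((none : Option (List Char)), []) c0 = (some c0, []) from rfl,
          foldl_feed_some]
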